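-- pv_equiv track=rewrite | github.com/IamMikee/CUHKSZ | CSC1002/A2_SDS_125040056.py | swap_prev_word
-- ===== SOURCE A (Python) =====
-- def get_word_bounds(text, position):
--     if not text or position < 0 or position >= len(text): return None
--     left = right = position
--     is_alphanumeric = True if text[position].isalnum() else False
--
--     while left > 0 and text[left - 1].isalnum() == is_alphanumeric:
--         left -= 1
--     while right < len(text) - 1 and text[right + 1].isalnum() == is_alphanumeric:
--         right += 1
--
--     return left, right
--
-- def swap_prev_word(text, position):
--     if not (bounds := get_word_bounds(text, position)): return text, position
--     left1, right1 = bounds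
--
--     prev_pos = left1 - 1
--     while prev_pos >= 0 and not text[prev_pos].isalnum():
--         prev_pos -= 1
--
--     if not (prev_word := get_word_bounds(text, prev_pos)): return text, position
--     left2, right2 = prev_word
--
--     new_text = text[:left2] + text[left1:right1 + 1] + text[right2 + 1:left1] + text[left2:right2 + 1] + text[right1 + 1:]
--     return new_text, left2 + (position - left1)
-- ===== SOURCE B (Python) =====
-- def swap_prev_word(text, position):
--     n = len(text)
--     if not (0 <= position < n):
--         return text, position
--     # tokenize into maximal runs of equal alnum-ness: (start, end, is_alnum)
--     runs = []
--     i = 0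
--     while i < n:
--         j = i + 1
--         a = text[i].isalnum()
--         while j < n and text[j].isalnum() == a:
--             j += 1
--         runs.append((i, j, a))
--         i = j
--     # token containing position
--     t = 0
--     while runs[t][1] <= position:
--         t += 1
--     # nearest preceding alnum token
--     p = t - 1
--     while p >= 0 and not runs[p][2]:
--         p -= 1
--     if p < 0:
--         return text, position
--     s1 = runs[t][0]
--     s2 = runs[p][0]
--     runs[p], runs[t] = runs[t], runs[p]
--     new_text = ''.join(text[a:b] for a, b, _ in runs)
--     return new_text, s2 + (position - s1)
-- ===== Notes on version B (the rewrite author's own statement) =====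
-- stated objective: alternative
-- what changed: A expands word bounds bidirectionally from the cursor with while-loops and re-derives the previous word with a second character scan plus a second bounds call; B instead tokenizes the whole text once into maximal alnum/non-alnum runs, picks the run containing the cursor and the nearest preceding alnum run by index, swaps them in the run list and joins the runs back.
import Mathlib
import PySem

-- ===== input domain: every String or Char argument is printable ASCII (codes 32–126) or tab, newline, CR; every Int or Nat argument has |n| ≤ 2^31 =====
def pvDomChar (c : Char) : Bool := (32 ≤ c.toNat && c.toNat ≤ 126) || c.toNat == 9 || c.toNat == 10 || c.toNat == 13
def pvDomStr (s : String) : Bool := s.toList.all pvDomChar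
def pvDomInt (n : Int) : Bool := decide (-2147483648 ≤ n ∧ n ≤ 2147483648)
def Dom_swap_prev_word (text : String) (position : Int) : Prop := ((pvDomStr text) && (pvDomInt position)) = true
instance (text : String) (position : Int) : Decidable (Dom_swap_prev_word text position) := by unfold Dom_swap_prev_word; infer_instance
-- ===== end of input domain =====

-- B rebuilds the string from a single left-to-right run tokenization instead of A's
-- bidirectional character scans around the cursor; objective: alternative decomposition (same value everywhere).

-- `text[k].isalnum()` for an in-range index k (both ports read characters only in range).
def pvAl (l : List Char) (k : Nat) : Bool := PySem.Chars.isalnum (l.getD k ' ')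

-- ===== PORT A =====
-- while left > 0 and text[left - 1].isalnum() == is_alphanumeric: left -= 1
def pvGoLeft (l : List Char) (a : Bool) : Nat → Nat
  | 0 => 0
  | k + 1 => if pvAl l k == a then pvGoLeft l a k else k + 1

-- while right < len(text) - 1 and text[right + 1].isalnum() == is_alphanumeric: right += 1
def pvGoRight (l : List Char) (a : Bool) (r : Nat) : Nat :=
  if h : r + 1 < l.length ∧ pvAl l (r + 1) == a then pvGoRight l a (r + 1) else r
termination_by l.length - r
decreasing_by omega

def get_word_bounds (l : List Char) (position : Int) : Option (Nat × Nat) :=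
  if l = [] ∨ position < 0 ∨ (l.length : Int) ≤ position then none
  else
    let p := position.toNat
    let a := pvAl l p
    some (pvGoLeft l a p, pvGoRight l a p)

-- prev_pos = left1 - 1; while prev_pos >= 0 and not text[prev_pos].isalnum(): prev_pos -= 1
def pvPrevPos (l : List Char) : Nat → Int
  | 0 => -1
  | k + 1 => if !(pvAl l k) then pvPrevPos l k else (k : Int)

def swap_prev_word (text : String) (position : Int) : String × Int :=
  let l := text.toList
  match get_word_bounds l position with
  | none => (text, position)
  | some (left1, right1) =>
    let prev_pos := pvPrevPos l left1
    match get_word_bounds l prev_pos with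
    | none => (text, position)
    | some (left2, right2) =>
      let nt := PySem.List.slice l none (some (left2 : Int))
             ++ PySem.List.slice l (some (left1 : Int)) (some ((right1 : Int) + 1))
             ++ PySem.List.slice l (some ((right2 : Int) + 1)) (some (left1 : Int))
             ++ PySem.List.slice l (some (left2 : Int)) (some ((right2 : Int) + 1))
             ++ PySem.List.slice l (some ((right1 : Int) + 1)) none
      (String.ofList nt, (left2 : Int) + (position - (left1 : Int)))

-- ===== PORT B =====
-- inner while of the tokenizer: while j < n and text[j].isalnum() == a: j += 1
def pvExtend (l : List Char) (a : Bool) (j : Nat) : Nat :=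
  if h : j < l.length ∧ pvAl l j == a then pvExtend l a (j + 1) else j
termination_by l.length - j
decreasing_by omega

theorem le_pvExtend (l : List Char) (a : Bool) (j : Nat) : j ≤ pvExtend l a j := by
  rw [pvExtend]
  split
  · exact Nat.le_trans (Nat.le_succ j) (le_pvExtend l a (j + 1))
  · exact Nat.le_refl j
termination_by l.length - j
decreasing_by omega

-- outer tokenizer loop: runs of (start, end, is_alnum), end exclusive
def pvRuns (l : List Char) (i : Nat) : List (Nat × Nat × Bool) :=
  if h : i < l.length then
    let a := pvAl l i
    let j := pvExtend l a (i + 1)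
    (i, j, a) :: pvRuns l j
  else []
termination_by l.length - i
decreasing_by exact Nat.sub_lt_sub_left h (Nat.lt_of_lt_of_le (Nat.lt_succ_self i) (le_pvExtend l (pvAl l i) (i + 1)))

-- while runs[t][1] <= position: t += 1   (the in-range guard only makes the loop total)
def pvFindT (runs : List (Nat × Nat × Bool)) (position : Int) (t : Nat) : Nat :=
  if h : t < runs.length then
    if ((runs.getD t (0, 0, false)).2.1 : Int) ≤ position then pvFindT runs position (t + 1) else t
  else t
termination_by runs.length - t
decreasing_by omega

-- p = t - 1; while p >= 0 and not runs[p][2]: p -= 1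
def pvFindP (runs : List (Nat × Nat × Bool)) : Nat → Int
  | 0 => -1
  | k + 1 => if !(runs.getD k (0, 0, false)).2.2 then pvFindP runs k else (k : Int)

def swap_prev_word_alt (text : String) (position : Int) : String × Int :=
  let l := text.toList
  if ¬ (0 ≤ position ∧ position < (l.length : Int)) then (text, position)
  else
    let runs := pvRuns l 0
    let t := pvFindT runs position 0
    let p := pvFindP runs t
    if p < 0 then (text, position)
    else
      let pN := p.toNat
      let rt := runs.getD t (0, 0, false)
      let rp := runs.getD pN (0, 0, false)
      let swapped := (runs.set pN rt).set t rp
      let nt := PySem.Chars.join []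
        (swapped.map (fun r => PySem.List.slice l (some (r.1 : Int)) (some (r.2.1 : Int))))
      (String.ofList nt, (rp.1 : Int) + (position - (rt.1 : Int)))

-- ===== PRECONDITION & SPEC =====
def Spec_swap_prev_word (text : String) (position : Int) (out : String × Int) : Prop := out = swap_prev_word_alt text position
instance (text : String) (position : Int) (out : String × Int) : Decidable (Spec_swap_prev_word text position out) := by unfold Spec_swap_prev_word; infer_instance

-- ===== CLAIM (what is proved, stated in full; the proofs are below) =====
def Claim_equal_swap_prev_word : Prop := ∀ (text : String) (position : Int), Dom_swap_prev_word text position → Spec_swap_prev_word text position (swap_prev_word text position)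

-- ===== LEMMAS AND PROOFS =====

-- the contiguous segment text[a:b] (for 0 ≤ a ≤ b ≤ len), proof-side normal form of both ports' slices
def pvSeg (l : List Char) (a b : Nat) : List Char := List.take (b - a) (List.drop a l)

-- `Contig i rs j`: rs is a list of nonempty runs tiling [i, j) contiguously
def Contig : Nat → List (Nat × Nat × Bool) → Nat → Prop
  | i, [], j => i = j
  | i, r :: rest, j => r.1 = i ∧ i < r.2.1 ∧ Contig r.2.1 rest j

theorem pvExtend_spec (l : List Char) (a : Bool) (j : Nat) (hj : j ≤ l.length) :
    pvExtend l a j ≤ l.length ∧ (∀ k, j ≤ k → k < pvExtend l a j → pvAl l k = a) ∧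
      (pvExtend l a j < l.length → pvAl l (pvExtend l a j) ≠ a) := by
  rw [pvExtend]
  split
  · rename_i h
    have ih := pvExtend_spec l a (j + 1) (by omega)
    refine ⟨ih.1, ?_, ih.2.2⟩
    intro k hk1 hk2
    rcases Nat.eq_or_lt_of_le hk1 with rfl | hlt
    · exact eq_of_beq h.2
    · exact ih.2.1 k hlt hk2
  · rename_i h
    refine ⟨hj, by omega, ?_⟩
    intro hlt hal
    exact h ⟨hlt, by simp [hal]⟩
termination_by l.length - j
decreasing_by omega

theorem pvExtend_eq_of (l : List Char) (a : Bool) (e j : Nat) (he : e ≤ l.length) (hj : j ≤ e)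
    (hall : ∀ k, j ≤ k → k < e → pvAl l k = a) (hmax : e < l.length → pvAl l e ≠ a) :
    pvExtend l a j = e := by
  rw [pvExtend]
  split
  · rename_i h
    rcases Nat.eq_or_lt_of_le hj with rfl | hlt
    · exact absurd (eq_of_beq h.2) (hmax h.1)
    · exact pvExtend_eq_of l a e (j + 1) he hlt (fun k h1 h2 => hall k (by omega) h2) hmax
  · rename_i h
    rcases Nat.eq_or_lt_of_le hj with rfl | hlt
    · rfl
    · exact absurd ⟨by omega, by simp [hall j le_rfl hlt]⟩ h
termination_by e - j

theorem pvGoRight_succ (l : List Char) (a : Bool) (r : Nat) :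
    pvGoRight l a r + 1 = pvExtend l a (r + 1) := by
  rw [pvGoRight]
  conv_rhs => rw [pvExtend]
  split
  · exact pvGoRight_succ l a (r + 1)
  · rfl
termination_by l.length - r
decreasing_by omega

theorem pvGoLeft_eq_of (l : List Char) (a : Bool) (s r : Nat) (hsr : s ≤ r)
    (hall : ∀ k, s ≤ k → k ≤ r → pvAl l k = a) (hmin : s = 0 ∨ pvAl l (s - 1) ≠ a) :
    pvGoLeft l a r = s := by
  induction r with
  | zero =>
    have : s = 0 := Nat.le_zero.mp hsr
    simp [pvGoLeft, this]
  | succ k ih =>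
    rw [pvGoLeft]
    rcases Nat.eq_or_lt_of_le hsr with rfl | hlt
    · rcases hmin with h0 | hne
      · omega
      · simp only [Nat.add_sub_cancel] at hne
        simp [hne]
    · have hk : pvAl l k = a := hall k (by omega) (by omega)
      simp only [hk, beq_self_eq_true, if_true]
      exact ih (by omega) (fun k h1 h2 => hall k h1 (by omega))

theorem pvPrevPos_eq_of (l : List Char) (s q : Nat) (hq : q < s) (ha : pvAl l q = true)
    (hnon : ∀ k, q < k → k < s → pvAl l k = false) : pvPrevPos l s = (q : Int) := by
  induction s with
  | zero => omega
  | succ m ih =>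
    rw [pvPrevPos]
    rcases Nat.eq_or_lt_of_le (Nat.lt_succ_iff.mp hq) with rfl | hlt
    · simp [ha]
    · rw [hnon m hlt (Nat.lt_succ_self m)]
      exact ih hlt (fun k h1 h2 => hnon k h1 (by omega))

theorem pvPrevPos_neg (l : List Char) (s : Nat) (hnon : ∀ k, k < s → pvAl l k = false) :
    pvPrevPos l s = -1 := by
  induction s with
  | zero => rfl
  | succ m ih =>
    rw [pvPrevPos, hnon m (Nat.lt_succ_self m)]
    exact ih (fun k hk => hnon k (by omega))

theorem pvRuns_contig (l : List Char) (i : Nat) (hi : i ≤ l.length) :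
    Contig i (pvRuns l i) l.length := by
  rw [pvRuns]
  split
  · rename_i h
    have hsp := pvExtend_spec l (pvAl l i) (i + 1) (by omega)
    have hle := le_pvExtend l (pvAl l i) (i + 1)
    simp only [Contig]
    exact ⟨trivial, by omega, pvRuns_contig l _ hsp.1⟩
  · rename_i h
    simp only [Contig]
    omega
termination_by l.length - i
decreasing_by
  rename_i h
  have hle := le_pvExtend l (pvAl l i) (i + 1)
  omega

theorem pvRuns_props (l : List Char) (i : Nat)
    (hleft : i = 0 ∨ (i < l.length → pvAl l (i - 1) ≠ pvAl l i)) :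
    ∀ r ∈ pvRuns l i, r.1 < r.2.1 ∧ r.2.1 ≤ l.length ∧
      (∀ k, r.1 ≤ k → k < r.2.1 → pvAl l k = r.2.2) ∧
      (r.2.1 < l.length → pvAl l r.2.1 ≠ r.2.2) ∧
      (r.1 = 0 ∨ pvAl l (r.1 - 1) ≠ r.2.2) := by
  rw [pvRuns]
  split
  · rename_i h
    have hsp := pvExtend_spec l (pvAl l i) (i + 1) (by omega)
    have hle := le_pvExtend l (pvAl l i) (i + 1)
    intro r hr
    rcases List.mem_cons.mp hr with rfl | hmem
    · refine ⟨Nat.lt_of_lt_of_le (Nat.lt_succ_self i) hle, hsp.1, ?_, hsp.2.2, ?_⟩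
      · intro k hk1 hk2
        rcases Nat.eq_or_lt_of_le hk1 with rfl | hlt
        · rfl
        · exact hsp.2.1 k hlt hk2
      · rcases hleft with h0 | hne
        · exact Or.inl h0
        · exact Or.inr (hne h)
    · have hnext : pvExtend l (pvAl l i) (i + 1) = 0 ∨
          (pvExtend l (pvAl l i) (i + 1) < l.length →
            pvAl l (pvExtend l (pvAl l i) (i + 1) - 1) ≠ pvAl l (pvExtend l (pvAl l i) (i + 1))) := by
        refine Or.inr (fun hlt => ?_)
        have h1 : pvAl l (pvExtend l (pvAl l i) (i + 1) - 1) = pvAl l i := by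
          rcases Nat.eq_or_lt_of_le hle with heq | hlt2
          · rw [← heq]; simp
          · exact hsp.2.1 _ (by omega) (by omega)
        rw [h1]
        exact fun hc => hsp.2.2 hlt hc.symm
      exact pvRuns_props l _ hnext r hmem
  · intro r hr
    simp at hr
termination_by l.length - i
decreasing_by
  rename_i h _ _
  have hle := le_pvExtend l (pvAl l i) (i + 1)
  omega

theorem pvFindT_shift (r : Nat × Nat × Bool) (rest : List (Nat × Nat × Bool)) (position : Int) (t : Nat) :
    pvFindT (r :: rest) position (t + 1) = pvFindT rest position t + 1 := by
  rw [pvFindT]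
  conv_rhs => rw [pvFindT]
  by_cases ht : t < rest.length
  · rw [dif_pos (by simpa using Nat.succ_lt_succ ht), dif_pos ht]
    simp only [List.getD_cons_succ]
    split
    · exact pvFindT_shift r rest position (t + 1)
    · rfl
  · rw [dif_neg (by simpa using fun h => ht (Nat.lt_of_succ_lt_succ h)), dif_neg ht]
termination_by rest.length - t

theorem pvFindT_found (l : List Char) (i : Nat) (hi : i ≤ l.length) (pos : Nat)
    (hip : i ≤ pos) (hpn : pos < l.length) :
    ∃ pre r post, pvRuns l i = pre ++ r :: post ∧
      pvFindT (pvRuns l i) (pos : Int) 0 = pre.length ∧ r.1 ≤ pos ∧ pos < r.2.1 := by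
  have hin : i < l.length := Nat.lt_of_le_of_lt hip hpn
  rw [pvRuns, dif_pos hin]
  dsimp only
  have hsp := pvExtend_spec l (pvAl l i) (i + 1) (by omega)
  have hle := le_pvExtend l (pvAl l i) (i + 1)
  set e := pvExtend l (pvAl l i) (i + 1) with he
  by_cases hpe : pos < e
  · refine ⟨[], (i, e, pvAl l i), pvRuns l e, rfl, ?_, hip, hpe⟩
    rw [pvFindT]
    rw [dif_pos (by simp)]
    simp only [List.getD_cons_zero]
    rw [if_neg (by omega)]
    rfl
  · have hep : e ≤ pos := by omega
    obtain ⟨pre, r, post, hdec, hfind, hr1, hr2⟩ := pvFindT_found l e hsp.1 pos hep hpn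
    refine ⟨(i, e, pvAl l i) :: pre, r, post, by rw [hdec]; rfl, ?_, hr1, hr2⟩
    rw [pvFindT, dif_pos (by simp), if_pos (by simp only [List.getD_cons_zero]; omega)]
    rw [hdec] at hfind ⊢
    rw [pvFindT_shift, hfind]
    simp
termination_by l.length - i
decreasing_by
  have hle := le_pvExtend l (pvAl l i) (i + 1)
  omega

theorem pvFindP_spec (runs : List (Nat × Nat × Bool)) (t : Nat) :
    ((∀ k, k < t → (runs.getD k (0, 0, false)).2.2 = false) ∧ pvFindP runs t = -1) ∨
    (∃ p, p < t ∧ (runs.getD p (0, 0, false)).2.2 = true ∧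
      (∀ k, p < k → k < t → (runs.getD k (0, 0, false)).2.2 = false) ∧ pvFindP runs t = (p : Int)) := by
  induction t with
  | zero => exact Or.inl ⟨by omega, rfl⟩
  | succ m ih =>
    by_cases hm : (runs.getD m (0, 0, false)).2.2 = true
    · exact Or.inr ⟨m, Nat.lt_succ_self m, hm, by omega, by rw [pvFindP, hm]; rfl⟩
    · have hmf : (runs.getD m (0, 0, false)).2.2 = false := by
        cases hb : (runs.getD m (0, 0, false)).2.2
        · rfl
        · exact absurd hb hm
      rcases ih with ⟨hall, hval⟩ | ⟨p, hp1, hp2, hp3, hval⟩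
      · refine Or.inl ⟨?_, by rw [pvFindP, hmf]; simpa using hval⟩
        intro k hk
        rcases Nat.lt_succ_iff_lt_or_eq.mp hk with h | rfl
        · exact hall k h
        · exact hmf
      · refine Or.inr ⟨p, by omega, hp2, ?_, by rw [pvFindP, hmf]; simpa using hval⟩
        intro k h1 h2
        rcases Nat.lt_succ_iff_lt_or_eq.mp h2 with h | rfl
        · exact hp3 k h1 h
        · exact hmf

theorem Contig_le (i : Nat) (rs : List (Nat × Nat × Bool)) (j : Nat) (h : Contig i rs j) : i ≤ j := by
  induction rs generalizing i with
  | nil => exact Nat.le_of_eq h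
  | cons r rest ih => exact Nat.le_trans (Nat.le_of_lt h.2.1) (ih _ h.2.2)

theorem Contig_append_split (xs ys : List (Nat × Nat × Bool)) (i j : Nat)
    (h : Contig i (xs ++ ys) j) : ∃ m, Contig i xs m ∧ Contig m ys j := by
  induction xs generalizing i with
  | nil => exact ⟨i, rfl, h⟩
  | cons r rest ih =>
    obtain ⟨m, h1, h2⟩ := ih _ h.2.2
    exact ⟨m, ⟨h.1, h.2.1, h1⟩, h2⟩

theorem Contig_covers (i : Nat) (rs : List (Nat × Nat × Bool)) (j : Nat) (h : Contig i rs j)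
    (k : Nat) (hik : i ≤ k) (hkj : k < j) : ∃ r ∈ rs, r.1 ≤ k ∧ k < r.2.1 := by
  induction rs generalizing i with
  | nil => simp only [Contig] at h; omega
  | cons r rest ih =>
    by_cases hk : k < r.2.1
    · exact ⟨r, List.mem_cons_self, by have h1 := h.1; omega, hk⟩
    · obtain ⟨r', hmem, h1, h2⟩ := ih _ h.2.2 (by omega)
      exact ⟨r', List.mem_cons_of_mem r hmem, h1, h2⟩

theorem pvSeg_append (l : List Char) (i e j : Nat) (h1 : i ≤ e) (h2 : e ≤ j) :
    pvSeg l i e ++ pvSeg l e j = pvSeg l i j := by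
  unfold pvSeg
  have hj : j - i = (e - i) + (j - e) := by omega
  rw [hj, List.take_add]
  congr 1
  rw [List.drop_drop]
  congr 2
  omega

theorem Contig_flatten (l : List Char) (rs : List (Nat × Nat × Bool)) (i j : Nat)
    (h : Contig i rs j) :
    (rs.map (fun r => pvSeg l r.1 r.2.1)).flatten = pvSeg l i j := by
  induction rs generalizing i with
  | nil => simp only [Contig] at h; subst h; simp [pvSeg]
  | cons r rest ih =>
    obtain ⟨h1, h2, h3⟩ := h
    have hej : r.2.1 ≤ j := Contig_le _ _ _ h3
    simp only [List.map_cons, List.flatten_cons, ih _ h3, h1]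
    exact pvSeg_append l i r.2.1 j (by omega) hej

theorem pvSet_len {α : Type} (xs : List α) (y w : α) (zs : List α) :
    (xs ++ y :: zs).set xs.length w = xs ++ w :: zs := by
  rw [List.set_append_right _ _ (le_refl _)]
  simp

theorem pvGetD_len (xs : List (Nat × Nat × Bool)) (y : Nat × Nat × Bool) (zs : List (Nat × Nat × Bool)) :
    (xs ++ y :: zs).getD xs.length (0, 0, false) = y := by
  rw [List.getD_append_right _ _ _ _ (le_refl _)]
  simp

theorem pvJoin_flatten (parts : List (List Char)) : PySem.Chars.join [] parts = parts.flatten := by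
  show List.intercalate [] parts = parts.flatten
  simp [List.intercalate]
  induction parts with
  | nil => rfl
  | cons h t ih => cases t <;> simp_all [List.intersperse]

-- ===== VERDICT (by name: the statement is the Claim_ definition above) =====
-- the character at any position of the run r of `pvRuns` containing it has r's flag,
-- and A's two word-boundary scans started inside r return exactly r's bounds
theorem pvBounds_of_run (l : List Char) (r : Nat × Nat × Bool) (hmem : r ∈ pvRuns l 0)
    (pos : Nat) (h1 : r.1 ≤ pos) (h2 : pos < r.2.1) :
    pvAl l pos = r.2.2 ∧ pvGoLeft l (pvAl l pos) pos = r.1 ∧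
      pvGoRight l (pvAl l pos) pos + 1 = r.2.1 := by
  obtain ⟨hlt, hlen, hall, hmax, hmin⟩ := pvRuns_props l 0 (Or.inl rfl) r hmem
  have ha : pvAl l pos = r.2.2 := hall pos h1 h2
  refine ⟨ha, ?_, ?_⟩
  · rw [ha]
    exact pvGoLeft_eq_of l r.2.2 r.1 pos h1 (fun k hk1 hk2 => hall k hk1 (by omega)) hmin
  · rw [ha, pvGoRight_succ]
    exact pvExtend_eq_of l r.2.2 r.2.1 (pos + 1) hlen (by omega)
      (fun k hk1 hk2 => hall k (by omega) hk2) hmax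

theorem pvGetD_after {xs : List (Nat × Nat × Bool)} (y : Nat × Nat × Bool)
    (zs : List (Nat × Nat × Bool)) (idx : Nat) :
    (xs ++ y :: zs).getD (xs.length + 1 + idx) (0, 0, false) = zs.getD idx (0, 0, false) := by
  rw [List.getD_append_right _ _ _ _ (by omega)]
  have h : xs.length + 1 + idx - xs.length = idx + 1 := by omega
  rw [h, List.getD_cons_succ]

theorem swap_prev_word_spec : Claim_equal_swap_prev_word := by
  intro text position _
  unfold Spec_swap_prev_word swap_prev_word swap_prev_word_alt
  dsimp only
  set l := text.toList with hl
  set n := l.length with hn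
  by_cases hg : 0 ≤ position ∧ position < (n : Int)
  case neg =>
    have hb : get_word_bounds l position = none := by
      rw [get_word_bounds]
      exact if_pos (by rcases lt_or_ge position 0 with h | h
                       · exact Or.inr (Or.inl h)
                       · exact Or.inr (Or.inr (by omega)))
    rw [hb, if_pos hg]
  case pos =>
    obtain ⟨pos, rfl⟩ : ∃ p : Nat, (p : Int) = position := ⟨position.toNat, Int.toNat_of_nonneg hg.1⟩
    rw [if_neg (not_not_intro hg)]
    have hposn : pos < n := by omega
    have hguard1 : ¬ (l = [] ∨ (pos : Int) < 0 ∨ (n : Int) ≤ (pos : Int)) := by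
      rintro (h | h | h)
      · rw [h] at hn; simp at hn; omega
      · omega
      · omega
    obtain ⟨pre, rT, post, hdec, hfind, hr1, hr2⟩ :=
      pvFindT_found l 0 (Nat.zero_le _) pos (Nat.zero_le _) hposn
    set runs := pvRuns l 0 with hruns
    have hmemT : rT ∈ runs := by rw [hdec]; exact List.mem_append_right _ List.mem_cons_self
    obtain ⟨haT, hleft1, hright1⟩ := pvBounds_of_run l rT hmemT pos hr1 hr2
    have hbounds1 : get_word_bounds l (pos : Int) = some (rT.1, rT.2.1 - 1) := by
      rw [get_word_bounds, if_neg hguard1]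
      dsimp only
      rw [Int.toNat_natCast, hleft1]
      refine congrArg some (Prod.mk.injEq _ _ _ _ ▸ ⟨rfl, by omega⟩)
    rw [hbounds1, hfind]
    dsimp only
    have ht : pre.length < runs.length := by rw [hdec]; simp
    have hcontig : Contig 0 runs n := pvRuns_contig l 0 (Nat.zero_le _)
    rcases pvFindP_spec runs pre.length with ⟨hallpre, hneg⟩ | ⟨pN, hplt, hptrue, hpmid, hpval⟩
    · -- no alphanumeric run before the cursor's run: both sides return the input unchanged
      rw [hneg, if_pos (by norm_num)]
      obtain ⟨m, hCpre, hCrest⟩ := Contig_append_split pre (rT :: post) 0 n (hdec ▸ hcontig)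
      have hm : m = rT.1 := hCrest.1.symm
      have hnonalnum : ∀ k, k < rT.1 → pvAl l k = false := by
        intro k hk
        obtain ⟨r, hmemr, hk1, hk2⟩ := Contig_covers 0 pre m hCpre k (Nat.zero_le _) (by omega)
        obtain ⟨idx, hidx, rfl⟩ := List.getElem_of_mem hmemr
        have hflag : (runs.getD idx (0, 0, false)).2.2 = false := hallpre idx (by omega)
        have hgd : runs.getD idx (0, 0, false) = pre[idx] := by
          rw [hdec, List.getD_append _ _ _ _ hidx, List.getD_eq_getElem _ _ hidx]
        have hmem' : pre[idx] ∈ runs := by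
          rw [hdec]; exact List.mem_append_left _ (List.getElem_mem hidx)
        have := (pvRuns_props l 0 (Or.inl rfl) _ hmem').2.2.1 k hk1 hk2
        rw [this, ← hgd, hflag]
      have hprev : pvPrevPos l rT.1 = -1 := pvPrevPos_neg l rT.1 hnonalnum
      rw [hprev, get_word_bounds, if_pos (by norm_num)]
    · -- a preceding alphanumeric run exists: both sides swap it with the cursor's run
      rw [hpval, if_neg (by omega)]
      -- decompose pre around the preceding alphanumeric run
      set pre2 := pre.take pN with hpre2
      set mid := pre.drop (pN + 1) with hmid
      set rP := pre[pN]'hplt with hrP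
      have hlen2 : pre2.length = pN := by rw [hpre2]; exact List.length_take_of_le (by omega)
      have hpredec : pre = pre2 ++ rP :: mid := by
        rw [hpre2, hmid, hrP, List.getElem_cons_drop]
        exact (List.take_append_drop pN pre).symm
      have hplen : pre.length = pN + 1 + mid.length := by
        rw [hpredec]; simp [hlen2]; omega
      have hrunsdec : runs = pre2 ++ rP :: (mid ++ rT :: post) := by
        rw [hdec, hpredec]; simp
      have hgetT : runs.getD pre.length (0, 0, false) = rT := by
        rw [hdec]; exact pvGetD_len pre rT post
      have hgetP : runs.getD pN (0, 0, false) = rP := by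
        rw [hrunsdec, ← hlen2]; exact pvGetD_len pre2 rP _
      rw [Int.toNat_natCast, hgetT, hgetP]
      have hmemP : rP ∈ runs := by
        rw [hrunsdec]; exact List.mem_append_right _ List.mem_cons_self
      obtain ⟨hPlt, hPlen, hPall, hPmax, hPmin⟩ := pvRuns_props l 0 (Or.inl rfl) rP hmemP
      rw [hgetP] at hptrue
      -- contiguity of the decomposition
      obtain ⟨m0, hC2, hCrest⟩ := Contig_append_split pre2 _ 0 n (hrunsdec ▸ hcontig)
      have hm0 : m0 = rP.1 := hCrest.1.symm
      obtain ⟨m1, hCmid, hCT⟩ := Contig_append_split mid (rT :: post) _ _ hCrest.2.2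
      have hm1 : m1 = rT.1 := hCT.1.symm
      rw [hm1] at hCmid
      have hCpost : Contig rT.2.1 post n := hCT.2.2
      -- the runs strictly between p and t are non-alphanumeric
      have hmidflag : ∀ r ∈ mid, r.2.2 = false := by
        intro r hmemr
        obtain ⟨idx, hidx, rfl⟩ := List.getElem_of_mem hmemr
        have hgd : runs.getD (pN + 1 + idx) (0, 0, false) = mid[idx] := by
          rw [hrunsdec, ← hlen2, pvGetD_after, List.getD_append _ _ _ _ hidx,
            List.getD_eq_getElem _ _ hidx]
        rw [← hgd]
        exact hpmid _ (by omega) (by omega)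
      have hmidchar : ∀ k, rP.2.1 ≤ k → k < rT.1 → pvAl l k = false := by
        intro k h1 h2
        obtain ⟨r, hmemr, hk1, hk2⟩ := Contig_covers rP.2.1 mid rT.1 hCmid k h1 h2
        have hmem' : r ∈ runs := by
          rw [hrunsdec]
          exact List.mem_append_right _ (List.mem_cons_of_mem _ (List.mem_append_left _ hmemr))
        rw [(pvRuns_props l 0 (Or.inl rfl) r hmem').2.2.1 k hk1 hk2, hmidflag r hmemr]
      have he2s1 : rP.2.1 ≤ rT.1 := Contig_le _ mid _ hCmid
      have haP : pvAl l (rP.2.1 - 1) = true := by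
        rw [hPall (rP.2.1 - 1) (by omega) (by omega), hptrue]
      -- A's leftward character scan stops on the last character of run p
      have hprev : pvPrevPos l rT.1 = ((rP.2.1 - 1 : Nat) : Int) :=
        pvPrevPos_eq_of l rT.1 (rP.2.1 - 1) (by omega) haP
          (fun k hk1 hk2 => hmidchar k (by omega) hk2)
      have hbounds2 : get_word_bounds l ((rP.2.1 - 1 : Nat) : Int) = some (rP.1, rP.2.1 - 1) := by
        rw [get_word_bounds, if_neg ?hgd2]
        case hgd2 =>
          rintro (h | h | h)
          · rw [h] at hn; simp at hn; omega
          · omega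
          · omega
        dsimp only
        rw [Int.toNat_natCast, haP, ← hptrue]
        have hgl : pvGoLeft l rP.2.2 (rP.2.1 - 1) = rP.1 :=
          pvGoLeft_eq_of l rP.2.2 rP.1 (rP.2.1 - 1) (by omega)
            (fun k hk1 hk2 => hPall k hk1 (by omega)) hPmin
        have hgr : pvGoRight l rP.2.2 (rP.2.1 - 1) + 1 = rP.2.1 := by
          rw [pvGoRight_succ]
          have h11 : rP.2.1 - 1 + 1 = rP.2.1 := by omega
          rw [h11]
          exact pvExtend_eq_of l rP.2.2 rP.2.1 rP.2.1 hPlen le_rfl (by omega) hPmax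
        rw [hgl]
        exact congrArg some (Prod.mk.injEq _ _ _ _ ▸ ⟨rfl, by omega⟩)
      rw [hprev, hbounds2]
      dsimp only
      have hc1 : ((rT.2.1 - 1 : Nat) : Int) + 1 = ((rT.2.1 : Nat) : Int) := by omega
      have hc2 : ((rP.2.1 - 1 : Nat) : Int) + 1 = ((rP.2.1 : Nat) : Int) := by omega
      rw [hc1, hc2]
      -- B's swapped run list, explicitly
      have hassoc : pre2 ++ rT :: (mid ++ rT :: post) = (pre2 ++ rT :: mid) ++ rT :: post := by
        simp
      have hlen3 : pre.length = (pre2 ++ rT :: mid).length := by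
        simp only [List.length_append, List.length_cons, hlen2]; omega
      have hswap : (runs.set pN rT).set pre.length rP = (pre2 ++ rT :: mid) ++ rP :: post := by
        rw [hrunsdec, ← hlen2, pvSet_len, hassoc, hlen3, pvSet_len]
      rw [hswap, pvJoin_flatten]
      have hf : (fun r : Nat × Nat × Bool => PySem.List.slice l (some (r.1 : Int)) (some (r.2.1 : Int)))
          = fun r => pvSeg l r.1 r.2.1 :=
        funext fun r => by rw [PySem.List.slice_natCast]; rfl
      rw [hf]
      refine congrArg₂ Prod.mk (congrArg String.ofList ?_) rfl
      -- both strings are the same five contiguous segments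
      have hJ2 : (List.map (fun r => pvSeg l r.1 r.2.1) pre2).flatten = pvSeg l 0 rP.1 := by
        have h := Contig_flatten l pre2 0 m0 hC2
        rw [hm0] at h
        exact h
      have hJmid : (List.map (fun r => pvSeg l r.1 r.2.1) mid).flatten = pvSeg l rP.2.1 rT.1 :=
        Contig_flatten l mid _ _ hCmid
      have hJpost : (List.map (fun r => pvSeg l r.1 r.2.1) post).flatten = pvSeg l rT.2.1 n :=
        Contig_flatten l post _ _ hCpost
      rw [PySem.List.slice_to_natCast, PySem.List.slice_from_natCast,
        PySem.List.slice_natCast, PySem.List.slice_natCast]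
      have htake : l.take rP.1 = pvSeg l 0 rP.1 := by simp [pvSeg]
      have hdrop : l.drop rT.2.1 = pvSeg l rT.2.1 n := by
        unfold pvSeg
        rw [List.take_of_length_le (by simp [hn])]
      rw [htake, hdrop, List.map_append, List.map_cons, List.flatten_append, List.flatten_cons,
        List.map_append, List.map_cons, List.flatten_append, List.flatten_cons, hJ2, hJmid, hJpost]
      simp only [pvSeg, PySem.List.slice_natCast, List.append_assoc]
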